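-- pv_equiv track=rewrite | github.com/RathlavathRamesh/OPENAI-NXTWAE-BUILDATHON | ai_core/video_analysis_script.py | _postprocess_combined
-- ===== SOURCE A (Python) =====
-- from typing import List, Optional, Tuple
--
-- def _postprocess_combined(text: str) -> str:
--     """Light cleanup: collapse repetitive ambient-only lines, trim blanks."""
--     lines = [ln.strip() for ln in text.splitlines()]
--     lines = [ln for ln in lines if ln]  # remove empty
--     pruned: List[str] = []
--     ambient_run = 0
--     for ln in lines:
--         if ln.startswith("[") and ln.endswith("]"):
--             ambient_run += 1
--             # keep at most 1 ambient line in a run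
--             if ambient_run == 1:
--                 pruned.append(ln)
--             continue
--         ambient_run = 0
--         pruned.append(ln)
--     if pruned and all(l.startswith("[") and l.endswith("]") for l in pruned):
--         pruned = pruned[:3]  # cap if entirely ambient
--     return "\n".join(pruned).strip()
-- ===== SOURCE B (Python) =====
-- def _postprocess_combined(text: str) -> str:
--     """Light cleanup: collapse repetitive ambient-only lines, trim blanks."""
--     lines = [ln.strip() for ln in text.splitlines()]
--     lines = [ln for ln in lines if ln]
--
--     def amb(ln: str) -> bool:
--         return ln.startswith("[") and ln.endswith("]")
--
--     # stateless pairwise filter: drop a line exactly when both it and its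
--     # predecessor are ambient (i.e. it is not the first of an ambient run)
--     pruned = [ln for prev, ln in zip([""] + lines, lines)
--               if not (amb(prev) and amb(ln))]
--
--     if pruned and all(amb(l) for l in pruned):
--         pruned = pruned[:3]
--     return "\n".join(pruned).strip()
-- ===== Notes on version B (the rewrite author's own statement) =====
-- stated objective: alternative
-- what changed: Replaces A's stateful loop with an ambient_run counter by a stateless pairwise filter: zip each line with its predecessor and drop a line exactly when both are ambient; preprocessing and the cap/join tail are unchanged.
import Mathlib
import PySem

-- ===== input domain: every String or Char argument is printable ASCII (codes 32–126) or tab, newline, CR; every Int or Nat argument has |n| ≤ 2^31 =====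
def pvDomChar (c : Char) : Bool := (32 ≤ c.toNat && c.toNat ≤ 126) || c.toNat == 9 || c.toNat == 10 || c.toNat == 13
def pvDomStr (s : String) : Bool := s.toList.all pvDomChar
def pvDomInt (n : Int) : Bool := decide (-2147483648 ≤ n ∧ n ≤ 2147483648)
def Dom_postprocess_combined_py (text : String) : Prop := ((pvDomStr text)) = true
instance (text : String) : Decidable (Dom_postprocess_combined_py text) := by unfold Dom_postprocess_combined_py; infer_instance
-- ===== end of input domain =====

-- B replaces A's ambient_run counter loop by a stateless pairwise filter over
-- (predecessor, line) pairs; same preprocessing and cap/join tail.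

-- ===== PORT A =====
-- the body of A's for-loop, acting on the state (pruned, ambient_run)
def pvStepA (st : List String × Int) (ln : String) : List String × Int :=
  if PySem.Str.startswith ln "[" && PySem.Str.endswith ln "]" then
    let run := st.2 + 1
    (if run == 1 then st.1 ++ [ln] else st.1, run)
  else
    (st.1 ++ [ln], 0)

def postprocess_combined_py (text : String) : String :=
  let lines := (PySem.Str.splitlines text).map PySem.Str.strip
  let lines := lines.filter (fun ln => ln ≠ "")
  let pruned := (lines.foldl pvStepA ([], 0)).1
  let pruned :=
    if !pruned.isEmpty &&
        pruned.all (fun l => PySem.Str.startswith l "[" && PySem.Str.endswith l "]") then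
      pruned.take 3
    else pruned
  PySem.Str.strip (PySem.Str.join "\n" pruned)

-- ===== PORT B =====
def pvAmb (ln : String) : Bool := PySem.Str.startswith ln "[" && PySem.Str.endswith ln "]"

def postprocess_combined_py_alt (text : String) : String :=
  let lines := ((PySem.Str.splitlines text).map PySem.Str.strip).filter (fun ln => ln ≠ "")
  -- zip([""] + lines, lines), filtered on the pair, keeping the line
  let pruned := ((("" :: lines).zip lines).filter
      (fun pl => !(pvAmb pl.1 && pvAmb pl.2))).map Prod.snd
  let pruned := if !pruned.isEmpty && pruned.all pvAmb then pruned.take 3 else pruned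
  PySem.Str.strip (PySem.Str.join "\n" pruned)

-- ===== PRECONDITION & SPEC =====
def Spec_postprocess_combined_py (text : String) (out : String) : Prop := out = postprocess_combined_py_alt text
instance (text : String) (out : String) : Decidable (Spec_postprocess_combined_py text out) := by unfold Spec_postprocess_combined_py; infer_instance

-- ===== CLAIM (what is proved, stated in full; the proofs are below) =====
def Claim_equal_postprocess_combined_py : Prop := ∀ (text : String), Dom_postprocess_combined_py text → Spec_postprocess_combined_py text (postprocess_combined_py text)

-- ===== LEMMAS AND PROOFS =====
-- common characterisation: keep a line iff not (previous-ambient flag ∧ ambient)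
def pvPair : Bool → List String → List String
  | _, [] => []
  | pa, ln :: rest => (if pa && pvAmb ln then [] else [ln]) ++ pvPair (pvAmb ln) rest

lemma pvStepA_amb (st : List String × Int) (ln : String) :
    pvStepA st ln =
      if pvAmb ln then (if st.2 + 1 == 1 then st.1 ++ [ln] else st.1, st.2 + 1)
      else (st.1 ++ [ln], 0) := rfl

lemma pvFold_eq (lines : List String) (acc : List String) (run : Int) (h : 0 ≤ run) :
    (lines.foldl pvStepA (acc, run)).1 = acc ++ pvPair (run != 0) lines := by
  induction lines generalizing acc run with
  | nil => simp [pvPair]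
  | cons ln rest ih =>
    simp only [List.foldl_cons]
    by_cases hamb : pvAmb ln = true
    · rcases eq_or_lt_of_le h with hr | hr
      · have hstep : pvStepA (acc, run) ln = (acc ++ [ln], 1) := by
          simp [pvStepA_amb, hamb, ← hr]
        rw [hstep, ih _ _ (by omega)]
        simp [← hr, pvPair, hamb]
      · have hstep : pvStepA (acc, run) ln = (acc, run + 1) := by
          simp [pvStepA_amb, hamb]; omega
        rw [hstep, ih _ _ (by omega)]
        have h0 : (run != 0) = true := by simp; omega
        have h1 : (run + 1 != 0) = true := by simp; omega
        simp [h0, h1, pvPair, hamb]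
    · simp only [Bool.not_eq_true] at hamb
      have hstep : pvStepA (acc, run) ln = (acc ++ [ln], 0) := by
        simp [pvStepA_amb, hamb]
      rw [hstep, ih _ _ le_rfl]
      simp [pvPair, hamb]

lemma pvZip_eq (p : String) (lines : List String) :
    (((p :: lines).zip lines).filter (fun pl => !(pvAmb pl.1 && pvAmb pl.2))).map Prod.snd
      = pvPair (pvAmb p) lines := by
  induction lines generalizing p with
  | nil => simp [pvPair]
  | cons ln rest ih =>
    have ih' := fun q => ih q
    simp only [Bool.not_and] at ih' ⊢
    simp only [List.zip_cons_cons, List.filter_cons]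
    by_cases h : (pvAmb p && pvAmb ln) = true
    · have h' := h
      rw [Bool.and_eq_true] at h'
      simp [h'.1, h'.2, pvPair, ih' ln]
    · have hd : pvAmb p = false ∨ pvAmb ln = false := by
        cases hp : pvAmb p <;> simp_all
      simp [hd, pvPair, ih' ln]
      rcases hd with hd | hd <;> simp [hd]

-- ===== VERDICT (by name: the statement is the Claim_ definition above) =====
theorem postprocess_combined_py_spec : Claim_equal_postprocess_combined_py := by
  intro text _
  unfold Spec_postprocess_combined_py postprocess_combined_py postprocess_combined_py_alt
  have h0 : pvAmb "" = false := by decide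
  simp only [pvFold_eq _ [] 0 le_rfl, pvZip_eq, h0]
  simp [pvAmb]
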